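-- pv_equiv track=rewrite | github.com/IntelliG-io/pdf-tools | packages/intellipdf/tools/converter/pdf_to_docx/converter/fonts.py | apply_translation_map
-- ===== SOURCE A (Python) =====
-- from typing import Mapping
--
-- def apply_translation_map(text: str, mapping: Mapping[str, str], max_key_length: int) -> str:
--     if not mapping:
--         return text
--     if max_key_length <= 1:
--         return "".join(mapping.get(char, char) for char in text)
--     result: list[str] = []
--     index = 0
--     length = len(text)
--     while index < length:
--         matched = False
--         max_window = min(max_key_length, length - index)
--         for window in range(max_window, 0, -1):
--             segment = text[index : index + window]
--             mapped = mapping.get(segment)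
--             if mapped is not None:
--                 result.append(mapped)
--                 index += window
--                 matched = True
--                 break
--         if not matched:
--             result.append(text[index])
--             index += 1
--     return "".join(result)
-- ===== SOURCE B (Python) =====
-- def apply_translation_map(text: str, mapping, max_key_length: int) -> str:
--     # Bucket the usable keys by their first character once; then at each text
--     # position only the few keys starting with that character are tried,
--     # keeping the longest one that matches.  No special cases needed.
--     limit = max_key_length if max_key_length > 1 else 1
--     buckets = {}
--     for key, value in mapping.items():
--         if key and len(key) <= limit:
--             buckets.setdefault(key[0], []).append((key, value))
--     pieces = []
--     i = 0
--     n = len(text)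
--     while i < n:
--         best = None
--         for key, value in buckets.get(text[i], ()):
--             if (best is None or len(best[0]) < len(key)) and text.startswith(key, i):
--                 best = (key, value)
--         if best is None:
--             pieces.append(text[i])
--             i += 1
--         else:
--             pieces.append(best[1])
--             i += len(best[0])
--     return "".join(pieces)
-- ===== Notes on version B (the rewrite author's own statement) =====
-- stated objective: alternative
-- what changed: B drops A's special cases and its per-position descending window scan (one substring slice and dict probe per window length), instead building a first-character index over the usable mapping keys once and, at each position, scanning only the keys that start with the current character, keeping the longest one that matches.
import Mathlib
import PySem

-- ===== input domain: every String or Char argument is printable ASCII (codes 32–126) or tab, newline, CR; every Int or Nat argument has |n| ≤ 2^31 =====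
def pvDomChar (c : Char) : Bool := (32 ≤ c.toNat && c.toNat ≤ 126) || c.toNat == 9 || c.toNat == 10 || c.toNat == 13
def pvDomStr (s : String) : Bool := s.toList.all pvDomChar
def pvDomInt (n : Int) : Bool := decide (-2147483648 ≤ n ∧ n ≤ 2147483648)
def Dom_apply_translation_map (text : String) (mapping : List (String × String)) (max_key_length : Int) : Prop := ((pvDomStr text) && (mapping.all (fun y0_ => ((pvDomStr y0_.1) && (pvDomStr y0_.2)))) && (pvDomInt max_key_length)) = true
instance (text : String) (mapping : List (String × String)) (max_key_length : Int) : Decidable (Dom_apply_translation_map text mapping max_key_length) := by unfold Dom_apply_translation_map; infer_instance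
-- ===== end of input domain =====

-- B replaces A's per-position descending window scan (a dict probe per window length)
-- by a first-character index over the usable mapping keys built once, keeping the longest
-- matching key per position; a different algorithm of comparable cost.

-- ===== PORT A =====
-- inner `for window in range(max_window, 0, -1)` loop: try window n, n-1, …, 1
def pvAFind (d : PySem.Dict String String) (rest : List Char) : Nat → Option (String × Nat)
  | 0 => none
  | w + 1 =>
    match d.get? (String.ofList (rest.take (w + 1))) with
    | some v => some (v, w + 1)
    | none => pvAFind d rest w

-- the `while index < length` loop of A, on the remaining characters
def pvALoop (d : PySem.Dict String String) (K : Int) : List Char → List String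
  | [] => []
  | c :: cs =>
    match pvAFind d (c :: cs) (min K (((c :: cs).length : Nat) : Int)).toNat with
    | some (v, w) => v :: pvALoop d K ((c :: cs).drop (max w 1))
    | none => String.ofList [c] :: pvALoop d K cs
termination_by rest => rest.length
decreasing_by
  · simp only [List.length_drop, List.length_cons]; omega
  · simp

def apply_translation_map (text : String) (mapping : List (String × String)) (max_key_length : Int) : String :=
  if mapping = [] then text
  else if max_key_length ≤ 1 then
    PySem.Str.join "" (text.toList.map (fun c =>
      (PySem.Dict.ofList mapping).getD (String.ofList [c]) (String.ofList [c])))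
  else
    PySem.Str.join "" (pvALoop (PySem.Dict.ofList mapping) max_key_length text.toList)

-- ===== PORT B =====
-- one step of B's `for key, value in buckets.get(text[i], ())` loop
def pvBStep (rest : List Char) : Option (String × String) → (String × String) → Option (String × String)
  | none, p => if p.1.toList <+: rest then some p else none
  | some q, p => if q.1.toList.length < p.1.toList.length ∧ p.1.toList <+: rest then some p else some q

def pvBBest (cands : List (String × String)) (rest : List Char) : Option (String × String) :=
  cands.foldl (pvBStep rest) none

-- B's bucket-building loop: group usable keys by first character
def pvBBuckets (items : List (String × String)) (limit : Int) : PySem.Dict Char (List (String × String)) :=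
  items.foldl (fun bk p =>
    if p.1.toList ≠ [] ∧ (p.1.toList.length : Int) ≤ limit then
      bk.modify (p.1.toList.headD ' ') [] (fun l => l ++ [p])
    else bk) PySem.Dict.empty

-- B's `while i < n` loop; fuel = number of remaining characters bounds the steps
def pvBLoop (bk : PySem.Dict Char (List (String × String))) : Nat → List Char → List String
  | _, [] => []
  | 0, _ :: _ => []
  | fuel + 1, c :: cs =>
    match pvBBest (bk.getD c []) (c :: cs) with
    | none => String.ofList [c] :: pvBLoop bk fuel cs
    | some p => p.2 :: pvBLoop bk fuel ((c :: cs).drop p.1.toList.length)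

def apply_translation_map_alt (text : String) (mapping : List (String × String)) (max_key_length : Int) : String :=
  PySem.Str.join "" (pvBLoop
    (pvBBuckets (PySem.Dict.ofList mapping).items (if max_key_length > 1 then max_key_length else 1))
    text.toList.length text.toList)

-- ===== PRECONDITION & SPEC =====
def Spec_apply_translation_map (text : String) (mapping : List (String × String)) (max_key_length : Int) (out : String) : Prop := out = apply_translation_map_alt text mapping max_key_length
instance (text : String) (mapping : List (String × String)) (max_key_length : Int) (out : String) : Decidable (Spec_apply_translation_map text mapping max_key_length out) := by unfold Spec_apply_translation_map; infer_instance

-- ===== CLAIM (what is proved, stated in full; the proofs are below) =====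
def Claim_equal_apply_translation_map : Prop := ∀ (text : String) (mapping : List (String × String)) (max_key_length : Int), Dom_apply_translation_map text mapping max_key_length → Spec_apply_translation_map text mapping max_key_length (apply_translation_map text mapping max_key_length)

-- ===== LEMMAS AND PROOFS =====

-- most-preferred candidate of a list: longest match, earliest on ties
def pvTake (rest : List Char) (p : String × String) : Option (String × String) → Option (String × String)
  | none => if p.1.toList <+: rest then some p else none
  | some q => if p.1.toList <+: rest ∧ q.1.toList.length ≤ p.1.toList.length then some p else some q
def pvFM (rest : List Char) : List (String × String) → Option (String × String)
  | [] => none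
  | p :: t => pvTake rest p (pvFM rest t)
def pvMerge : Option (String × String) → Option (String × String) → Option (String × String)
  | acc, none => acc
  | none, some q => some q
  | some a, some q => if a.1.toList.length < q.1.toList.length then some q else some a

theorem pvFM_some_prefix (rest : List Char) :
    ∀ (l : List (String × String)) (q : String × String),
      pvFM rest l = some q → q.1.toList <+: rest := by
  intro l
  induction l with
  | nil => intro q h; simp [pvFM] at h
  | cons p t ih =>
    intro q h
    rw [pvFM] at h
    cases ht : pvFM rest t with
    | none =>
      rw [ht, pvTake] at h
      split_ifs at h with hp
      obtain rfl := Option.some.inj h; exact hp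
    | some q0 =>
      rw [ht, pvTake] at h
      split_ifs at h with hp
      · obtain rfl := Option.some.inj h; exact hp.1
      · obtain rfl := Option.some.inj h; exact ih q0 ht

theorem pvFM_some_mem (rest : List Char) :
    ∀ (l : List (String × String)) (q : String × String),
      pvFM rest l = some q → q ∈ l := by
  intro l
  induction l with
  | nil => intro q h; simp [pvFM] at h
  | cons p t ih =>
    intro q h
    rw [pvFM] at h
    cases ht : pvFM rest t with
    | none =>
      rw [ht, pvTake] at h
      split_ifs at h
      obtain rfl := Option.some.inj h; exact List.mem_cons_self ..
    | some q0 =>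
      rw [ht, pvTake] at h
      split_ifs at h
      · obtain rfl := Option.some.inj h; exact List.mem_cons_self ..
      · obtain rfl := Option.some.inj h; exact List.mem_cons_of_mem _ (ih q0 ht)

theorem pvFM_eq_none (rest : List Char) (l : List (String × String)) :
    pvFM rest l = none ↔ ∀ p ∈ l, ¬ (p.1.toList <+: rest) := by
  induction l with
  | nil => simp [pvFM]
  | cons p t ih =>
    rw [pvFM]
    cases ht : pvFM rest t with
    | none =>
      rw [pvTake]
      split_ifs with hp
      · exact iff_of_false (by simp) (fun h => h p (List.mem_cons_self ..) hp)
      · simp only [true_iff]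
        intro q hq
        rcases List.mem_cons.mp hq with rfl | hq
        · exact hp
        · exact (ih.mp ht) q hq
    | some q0 =>
      have hq0 : q0.1.toList <+: rest := pvFM_some_prefix rest t q0 ht
      have hmem : q0 ∈ t := pvFM_some_mem rest t q0 ht
      rw [pvTake]
      have hne : ¬ ∀ r ∈ p :: t, ¬ (r.1.toList <+: rest) := by
        intro h; exact h q0 (List.mem_cons_of_mem _ hmem) hq0
      exact iff_of_false (by split_ifs <;> simp) hne

theorem pvFM_eq_some (rest : List Char) :
    ∀ (l : List (String × String)) (p : String × String),
    pvFM rest l = some p →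
    p ∈ l ∧ p.1.toList <+: rest ∧
      ∀ q ∈ l, q.1.toList <+: rest → q.1.toList.length ≤ p.1.toList.length := by
  intro l
  induction l with
  | nil => intro p h; simp [pvFM] at h
  | cons r t ih =>
    intro p h
    rw [pvFM] at h
    cases ht : pvFM rest t with
    | none =>
      rw [ht, pvTake] at h
      split_ifs at h with hp
      obtain rfl := Option.some.inj h
      refine ⟨List.mem_cons_self .., hp, ?_⟩
      intro q hq hqpre
      rcases List.mem_cons.mp hq with rfl | hq
      · exact le_refl _
      · exact absurd hqpre ((pvFM_eq_none rest t).mp ht q hq)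
    | some q0 =>
      rw [ht, pvTake] at h
      obtain ⟨hq0m, hq0p, hq0max⟩ := ih q0 ht
      split_ifs at h with hp
      · obtain rfl := Option.some.inj h
        refine ⟨List.mem_cons_self .., hp.1, ?_⟩
        intro q hq hqpre
        rcases List.mem_cons.mp hq with rfl | hq
        · exact le_refl _
        · exact le_trans (hq0max q hq hqpre) hp.2
      · obtain rfl := Option.some.inj h
        refine ⟨List.mem_cons_of_mem _ hq0m, hq0p, ?_⟩
        intro q hq hqpre
        rcases List.mem_cons.mp hq with rfl | hq
        · push_neg at hp
          have := hp hqpre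
          omega
        · exact hq0max q hq hqpre

theorem pvFold_eq_merge (rest : List Char) :
    ∀ (l : List (String × String)) (acc : Option (String × String)),
      l.foldl (pvBStep rest) acc = pvMerge acc (pvFM rest l) := by
  intro l
  induction l with
  | nil => intro acc; cases acc <;> rfl
  | cons p t ih =>
    intro acc
    rw [List.foldl_cons, ih (pvBStep rest acc p), pvFM]
    cases acc with
    | none =>
      cases ht : pvFM rest t with
      | none =>
        rw [pvTake]
        by_cases hpre : p.1.toList <+: rest <;>
          simp only [pvBStep, hpre, and_true, true_and, and_false, false_and, if_true, if_false] <;>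
          (try split_ifs) <;> simp only [pvMerge] <;> (try split_ifs) <;> first | rfl | omega | tauto
      | some q =>
        rw [pvTake]
        by_cases hpre : p.1.toList <+: rest <;>
          simp only [pvBStep, hpre, and_true, true_and, and_false, false_and, if_true, if_false] <;>
          (try split_ifs) <;> simp only [pvMerge] <;> (try split_ifs) <;> first | rfl | omega | tauto
    | some a =>
      cases ht : pvFM rest t with
      | none =>
        rw [pvTake]
        by_cases hpre : p.1.toList <+: rest <;>
          simp only [pvBStep, hpre, and_true, true_and, and_false, false_and, if_true, if_false] <;>
          (try split_ifs) <;> simp only [pvMerge] <;> (try split_ifs) <;> first | rfl | omega | tauto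
      | some q =>
        rw [pvTake]
        by_cases hpre : p.1.toList <+: rest <;>
          simp only [pvBStep, hpre, and_true, true_and, and_false, false_and, if_true, if_false] <;>
          (try split_ifs) <;> simp only [pvMerge] <;> (try split_ifs) <;> first | rfl | omega | tauto

theorem pvBBest_eq_fm (rest : List Char) (l : List (String × String)) :
    pvBBest l rest = pvFM rest l := by
  unfold pvBBest
  rw [pvFold_eq_merge rest l none]
  cases pvFM rest l <;> rfl

theorem pvAFind_none (d : PySem.Dict String String) (rest : List Char) :
    ∀ n, (∀ u, 1 ≤ u → u ≤ n → d.get? (String.ofList (rest.take u)) = none) →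
      pvAFind d rest n = none := by
  intro n
  induction n with
  | zero => intro _; simp [pvAFind]
  | succ m ih =>
    intro h
    simp only [pvAFind, h (m + 1) (by omega) (le_refl _)]
    exact ih (fun u h1 h2 => h u h1 (by omega))

theorem pvAFind_some (d : PySem.Dict String String) (rest : List Char) (v : String) (w : Nat) :
    ∀ n, d.get? (String.ofList (rest.take w)) = some v → 1 ≤ w → w ≤ n →
      (∀ u, w < u → u ≤ n → d.get? (String.ofList (rest.take u)) = none) →
      pvAFind d rest n = some (v, w) := by
  intro n
  induction n with
  | zero => intro _ h1 h2 _; omega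
  | succ m ih =>
    intro hget h1 h2 hmax
    by_cases hw : w = m + 1
    · subst hw
      simp only [pvAFind, hget]
    · have hnone : d.get? (String.ofList (rest.take (m + 1))) = none :=
        hmax (m + 1) (by omega) (le_refl _)
      simp only [pvAFind, hnone]
      exact ih hget h1 (by omega) (fun u hu1 hu2 => hmax u hu1 (by omega))

theorem pvPrefix_head (k : List Char) (c : Char) (cs : List Char)
    (hne : k ≠ []) (hpre : k <+: c :: cs) : k.headD ' ' = c := by
  cases k with
  | nil => exact absurd rfl hne
  | cons x t =>
    obtain ⟨hx, -⟩ := List.cons_prefix_cons.mp hpre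
    simpa using hx

theorem pvBuckets_getD_aux (limit : Int) (c : Char) :
    ∀ (l : List (String × String)) (bk : PySem.Dict Char (List (String × String))),
      (l.foldl (fun bk p =>
        if p.1.toList ≠ [] ∧ (p.1.toList.length : Int) ≤ limit then
          bk.modify (p.1.toList.headD ' ') [] (fun l => l ++ [p])
        else bk) bk).getD c []
      = bk.getD c [] ++ l.filter (fun p => decide (p.1.toList ≠ [] ∧ (p.1.toList.length : Int) ≤ limit ∧ p.1.toList.headD ' ' = c)) := by
  intro l
  induction l with
  | nil => intro bk; simp
  | cons p t ih =>
    intro bk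
    rw [List.foldl_cons, ih]
    by_cases hg : p.1.toList ≠ [] ∧ (p.1.toList.length : Int) ≤ limit
    · by_cases hc : c = p.1.toList.headD ' '
      · rw [if_pos hg, List.filter_cons,
          if_pos (by simp only [decide_eq_true_eq]; exact ⟨hg.1, hg.2, hc.symm⟩),
          PySem.Dict.getD_modify, if_pos hc, ← hc]
        simp
      · rw [if_pos hg, List.filter_cons,
          if_neg (by simp only [decide_eq_true_eq]; rintro ⟨-, -, h3⟩; exact hc h3.symm),
          PySem.Dict.getD_modify, if_neg hc]
    · rw [if_neg hg, List.filter_cons,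
        if_neg (by simp only [decide_eq_true_eq]; rintro ⟨h1, h2, -⟩; exact hg ⟨h1, h2⟩)]

theorem pvJoin_singletons (rest : List Char) :
    PySem.Str.join "" (rest.map (fun c => String.ofList [c])) = String.ofList rest := by
  have h : (PySem.Str.join "" (rest.map (fun c => String.ofList [c]))).toList = rest := by
    rw [PySem.Str.toList_join]
    have : (rest.map (fun c => String.ofList [c])).map String.toList = rest.map (fun c => [c]) := by
      simp [List.map_map, Function.comp_def, String.toList_ofList]
    simp only [this]
    simp [PySem.Chars.join_nil_singletons rest]
  calc PySem.Str.join "" (rest.map (fun c => String.ofList [c]))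
      = String.ofList (PySem.Str.join "" (rest.map (fun c => String.ofList [c]))).toList := String.ofList_toList.symm
    _ = String.ofList rest := by rw [h]

theorem pvBuckets_getD (limit : Int) (c : Char) (l : List (String × String)) :
    (pvBBuckets l limit).getD c []
      = l.filter (fun p => decide (p.1.toList ≠ [] ∧ (p.1.toList.length : Int) ≤ limit ∧ p.1.toList.headD ' ' = c)) := by
  unfold pvBBuckets
  rw [pvBuckets_getD_aux]
  simp [PySem.Dict.getD_empty]

-- selection equivalence, general branch: B's pick determines A's window scan
theorem pvSel_some (d : PySem.Dict String String) (hnd : d.keys.Nodup) (K : Int)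
    (c : Char) (cs : List Char) (k v : String)
    (h : pvFM (c :: cs) (d.items.filter (fun p => decide (p.1.toList ≠ [] ∧ (p.1.toList.length : Int) ≤ K ∧ p.1.toList.headD ' ' = c))) = some (k, v)) :
    pvAFind d (c :: cs) (min K (((c :: cs).length : Nat) : Int)).toNat = some (v, k.toList.length) := by
  obtain ⟨hmem, hpre, hmax⟩ := pvFM_eq_some _ _ _ h
  rw [List.mem_filter] at hmem
  obtain ⟨hitems, hprops⟩ := hmem
  simp only [decide_eq_true_eq] at hprops
  obtain ⟨hne, hlen, -⟩ := hprops
  have hw1 : 1 ≤ k.toList.length := List.length_pos_of_ne_nil hne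
  have hple : k.toList.length ≤ (c :: cs).length := hpre.length_le
  have htake : (c :: cs).take k.toList.length = k.toList := (List.prefix_iff_eq_take.mp hpre).symm
  apply pvAFind_some
  · rw [htake, String.ofList_toList]
    exact (PySem.Dict.get?_eq_some_iff_mem_items d k v hnd).mpr hitems
  · exact hw1
  · omega
  · intro u hu1 hu2
    cases hgu : d.get? (String.ofList ((c :: cs).take u)) with
    | none => rfl
    | some v' =>
      exfalso
      have humem : (String.ofList ((c :: cs).take u), v') ∈ d.items :=
        PySem.Dict.mem_items_of_get?_eq_some _ hgu
      have hulen : ((c :: cs).take u).length = u := by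
        rw [List.length_take]; omega
      have hfmem : (String.ofList ((c :: cs).take u), v') ∈
          d.items.filter (fun p => decide (p.1.toList ≠ [] ∧ (p.1.toList.length : Int) ≤ K ∧ p.1.toList.headD ' ' = c)) := by
        rw [List.mem_filter]
        refine ⟨humem, ?_⟩
        simp only [decide_eq_true_eq, String.toList_ofList]
        refine ⟨?_, by omega, ?_⟩
        · intro hnil
          rw [hnil] at hulen
          simp at hulen; omega
        · exact pvPrefix_head _ c cs
            (by intro hnil; rw [hnil] at hulen; simp at hulen; omega)
            (List.take_prefix u (c :: cs))
      have := hmax _ hfmem (by simpa [String.toList_ofList] using List.take_prefix u (c :: cs))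
      simp only [String.toList_ofList] at this
      omega

theorem pvSel_none (d : PySem.Dict String String) (K : Int)
    (c : Char) (cs : List Char)
    (h : pvFM (c :: cs) (d.items.filter (fun p => decide (p.1.toList ≠ [] ∧ (p.1.toList.length : Int) ≤ K ∧ p.1.toList.headD ' ' = c))) = none) :
    pvAFind d (c :: cs) (min K (((c :: cs).length : Nat) : Int)).toNat = none := by
  apply pvAFind_none
  intro u hu1 hu2
  cases hgu : d.get? (String.ofList ((c :: cs).take u)) with
  | none => rfl
  | some v' =>
    exfalso
    have humem : (String.ofList ((c :: cs).take u), v') ∈ d.items :=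
      PySem.Dict.mem_items_of_get?_eq_some _ hgu
    have hulen : ((c :: cs).take u).length = u := by
      rw [List.length_take]; omega
    have hnil' : ((c :: cs).take u) ≠ [] := by
      intro hnil; rw [hnil] at hulen; simp at hulen; omega
    have hfmem : (String.ofList ((c :: cs).take u), v') ∈
        d.items.filter (fun p => decide (p.1.toList ≠ [] ∧ (p.1.toList.length : Int) ≤ K ∧ p.1.toList.headD ' ' = c)) := by
      rw [List.mem_filter]
      refine ⟨humem, ?_⟩
      simp only [decide_eq_true_eq, String.toList_ofList]
      exact ⟨hnil', by omega, pvPrefix_head _ c cs hnil' (List.take_prefix u (c :: cs))⟩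
    exact (pvFM_eq_none _ _).mp h _ hfmem
      (by simpa [String.toList_ofList] using List.take_prefix u (c :: cs))

-- loops agree, general branch
theorem pvLoop_eq (d : PySem.Dict String String) (hnd : d.keys.Nodup) (K : Int) :
    ∀ (fuel : Nat) (rest : List Char), rest.length ≤ fuel →
      pvBLoop (pvBBuckets d.items K) fuel rest = pvALoop d K rest := by
  intro fuel
  induction fuel with
  | zero =>
    intro rest h
    have hnil : rest = [] := List.eq_nil_of_length_eq_zero (by omega)
    subst hnil
    simp [pvBLoop, pvALoop]
  | succ f ih =>
    intro rest hlen
    cases rest with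
    | nil => simp [pvBLoop, pvALoop]
    | cons c cs =>
      simp only [pvBLoop]
      rw [pvBBest_eq_fm, pvBuckets_getD]
      cases hfm : pvFM (c :: cs) (d.items.filter (fun p => decide (p.1.toList ≠ [] ∧ (p.1.toList.length : Int) ≤ K ∧ p.1.toList.headD ' ' = c))) with
      | none =>
        have hA := pvSel_none d K c cs hfm
        rw [pvALoop, hA]
        dsimp only
        congr 1
        exact ih cs (by simpa using Nat.le_of_succ_le_succ (by simpa using hlen))
      | some p =>
        obtain ⟨k, v⟩ := p
        have hA := pvSel_some d hnd K c cs k v hfm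
        have hw1 : 1 ≤ k.toList.length := by
          obtain ⟨hm, -, -⟩ := pvFM_eq_some _ _ _ hfm
          rw [List.mem_filter] at hm
          simp only [decide_eq_true_eq] at hm
          exact List.length_pos_of_ne_nil hm.2.1
        rw [pvALoop, hA]
        dsimp only
        rw [show max k.toList.length 1 = k.toList.length by omega]
        congr 1
        apply ih
        simp only [List.length_drop, List.length_cons] at *
        omega

-- a key surviving the limit-1 bucket filter is exactly the one-character key of its bucket
theorem pvFilter_one (d : PySem.Dict String String) (hnd : d.keys.Nodup) (c : Char)
    (p : String × String)
    (hp : p ∈ d.items.filter (fun p => decide (p.1.toList ≠ [] ∧ (p.1.toList.length : Int) ≤ (1 : Int) ∧ p.1.toList.headD ' ' = c))) :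
    p.1 = String.ofList [c] ∧ d.get? (String.ofList [c]) = some p.2 := by
  rw [List.mem_filter] at hp
  obtain ⟨hit, hpr⟩ := hp
  simp only [decide_eq_true_eq] at hpr
  obtain ⟨hne, hl1, hh⟩ := hpr
  have hkl : p.1.toList = [c] := by
    cases hk : p.1.toList with
    | nil => exact absurd hk hne
    | cons x t =>
      rw [hk] at hh hl1
      simp only [List.headD_cons] at hh
      have ht : t = [] := by
        apply List.eq_nil_of_length_eq_zero
        simp only [List.length_cons] at hl1
        omega
      rw [hh, ht]
  have hp1 : p.1 = String.ofList [c] := by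
    rw [← hkl]
    exact String.ofList_toList.symm
  refine ⟨hp1, ?_⟩
  rw [← hp1]
  exact (PySem.Dict.get?_eq_some_iff_mem_items d p.1 p.2 hnd).mpr hit

-- B's loop with limit 1 is A's per-character translation
theorem pvLoop_one (d : PySem.Dict String String) (hnd : d.keys.Nodup) :
    ∀ (fuel : Nat) (rest : List Char), rest.length ≤ fuel →
      pvBLoop (pvBBuckets d.items 1) fuel rest
        = rest.map (fun c => d.getD (String.ofList [c]) (String.ofList [c])) := by
  intro fuel
  induction fuel with
  | zero =>
    intro rest h
    have hnil : rest = [] := List.eq_nil_of_length_eq_zero (by omega)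
    subst hnil
    simp [pvBLoop]
  | succ f ih =>
    intro rest hlen
    cases rest with
    | nil => simp [pvBLoop]
    | cons c cs =>
      simp only [pvBLoop]
      rw [pvBBest_eq_fm, pvBuckets_getD]
      cases hg : d.get? (String.ofList [c]) with
      | some v =>
        have hfm : pvFM (c :: cs) (d.items.filter (fun p => decide (p.1.toList ≠ [] ∧ (p.1.toList.length : Int) ≤ (1 : Int) ∧ p.1.toList.headD ' ' = c))) = some (String.ofList [c], v) := by
          cases hfm' : pvFM (c :: cs) (d.items.filter (fun p => decide (p.1.toList ≠ [] ∧ (p.1.toList.length : Int) ≤ (1 : Int) ∧ p.1.toList.headD ' ' = c))) with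
          | none =>
            exfalso
            have hmemf : (String.ofList [c], v) ∈ d.items.filter (fun p => decide (p.1.toList ≠ [] ∧ (p.1.toList.length : Int) ≤ (1 : Int) ∧ p.1.toList.headD ' ' = c)) := by
              rw [List.mem_filter]
              refine ⟨PySem.Dict.mem_items_of_get?_eq_some _ hg, ?_⟩
              simp [String.toList_ofList]
            exact (pvFM_eq_none _ _).mp hfm' _ hmemf
              (by simp only [String.toList_ofList]; exact ⟨cs, rfl⟩)
          | some p =>
            obtain ⟨hm, -, -⟩ := pvFM_eq_some _ _ _ hfm'
            obtain ⟨hp1, hp2⟩ := pvFilter_one d hnd c p hm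
            rw [hg] at hp2
            obtain ⟨pk, pv⟩ := p
            simp only at hp1 hp2
            rw [hp1, Option.some.inj hp2]
        rw [hfm]
        dsimp only
        rw [String.toList_ofList]
        simp only [List.length_cons, List.length_nil]
        rw [List.map_cons, PySem.Dict.getD_eq_get?_getD, hg]
        simp only [Option.getD_some, List.drop_succ_cons, List.drop_zero]
        congr 1
        exact ih cs (by simp only [List.length_cons] at hlen; omega)
      | none =>
        have hfm : pvFM (c :: cs) (d.items.filter (fun p => decide (p.1.toList ≠ [] ∧ (p.1.toList.length : Int) ≤ (1 : Int) ∧ p.1.toList.headD ' ' = c))) = none := by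
          rw [pvFM_eq_none]
          intro p hp hpre
          obtain ⟨-, hp2⟩ := pvFilter_one d hnd c p hp
          rw [hg] at hp2
          cases hp2
        rw [hfm]
        rw [List.map_cons, PySem.Dict.getD_eq_get?_getD, hg]
        simp only [Option.getD_none]
        congr 1
        exact ih cs (by simp only [List.length_cons] at hlen; omega)

-- B's loop over an empty mapping copies the text
theorem pvLoop_nil (limit : Int) :
    ∀ (fuel : Nat) (rest : List Char), rest.length ≤ fuel →
      pvBLoop (pvBBuckets ([] : List (String × String)) limit) fuel rest
        = rest.map (fun c => String.ofList [c]) := by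
  intro fuel
  induction fuel with
  | zero =>
    intro rest h
    have hnil : rest = [] := List.eq_nil_of_length_eq_zero (by omega)
    subst hnil
    simp [pvBLoop]
  | succ f ih =>
    intro rest hlen
    cases rest with
    | nil => simp [pvBLoop]
    | cons c cs =>
      simp only [pvBLoop]
      rw [pvBBest_eq_fm, pvBuckets_getD]
      simp only [List.filter_nil, pvFM, List.map_cons]
      congr 1
      exact ih cs (by simp only [List.length_cons] at hlen; omega)

-- ===== VERDICT (by name: the statement is the Claim_ definition above) =====
theorem apply_translation_map_spec : Claim_equal_apply_translation_map := by
  intro text mapping K hdom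
  unfold Spec_apply_translation_map
  unfold apply_translation_map apply_translation_map_alt
  by_cases hm : mapping = []
  · subst hm
    rw [if_pos rfl]
    rw [show (PySem.Dict.ofList ([] : List (String × String))).items = [] from rfl]
    rw [pvLoop_nil _ _ _ (le_refl _), pvJoin_singletons, String.ofList_toList]
  · rw [if_neg hm]
    by_cases hk : K ≤ 1
    · rw [if_pos hk, if_neg (by omega : ¬ K > 1),
        pvLoop_one (PySem.Dict.ofList mapping) (PySem.Dict.nodup_keys_ofList mapping) _ _ (le_refl _)]
    · rw [if_neg hk, if_pos (by omega : K > 1),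
        pvLoop_eq (PySem.Dict.ofList mapping) (PySem.Dict.nodup_keys_ofList mapping) K _ _ (le_refl _)]
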